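-- pv_equiv track=rewrite | github.com/ecoon/ats_input_spec | ats_input_spec/known_specs.py | to_specname
-- ===== SOURCE A (Python) =====
-- def to_specname(inname):
--     chars = []
--     name = inname.replace("_","-")
--
--     for i in range(len(name)):
--         if name[i].isupper():
--             if i != 0:
--                 if i+1 < len(name) and name[i+1].islower():
--                     chars.append("-")
--                 elif name[i-1].islower():
--                     chars.append("-")
--             elif i != 0 and i+1 == len(name):
--                 chars.append("-")
--
--         chars.append(name[i].lower())
--     res =  "".join(chars)+"-spec"
--     res = res.replace("--", "-")
--     return res
-- ===== SOURCE B (Python) =====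
-- def to_specname(inname):
--     # Tokenize into maximal runs of one case-class, then emit runs with dashes
--     # at camelCase word boundaries; lowercase once at the end.
--     name = inname.replace("_", "-")
--     runs = []
--     for c in name:
--         k = 'u' if c.isupper() else ('l' if c.islower() else 'o')
--         if runs and runs[-1][0] == k:
--             runs[-1] = (k, runs[-1][1] + c)
--         else:
--             runs.append((k, c))
--
--     def emit(rs, prev_low, at_start):
--         if not rs:
--             return ""
--         (k, run), rest = rs[0], rs[1:]
--         next_low = bool(rest) and rest[0][0] == 'l'
--         if k == 'u':
--             if len(run) == 1:
--                 piece = ("-" if not at_start and (prev_low or next_low) else "") + run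
--             else:
--                 piece = (("-" if prev_low else "") + run[:-1]
--                          + ("-" if next_low else "") + run[-1])
--         else:
--             piece = run
--         return piece + emit(rest, k == 'l', False)
--
--     return (emit(runs, False, True).lower() + "-spec").replace("--", "-")
-- ===== Notes on version B (the rewrite author's own statement) =====
-- stated objective: alternative
-- what changed: Replaced A's index-based scan with name[i-1]/name[i+1] neighbor tests by a two-phase tokenizer: group the string into maximal runs of one case-class (upper/lower/other), then emit each run with dashes at word boundaries decided per run, lowercasing once at the end.
import Mathlib
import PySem

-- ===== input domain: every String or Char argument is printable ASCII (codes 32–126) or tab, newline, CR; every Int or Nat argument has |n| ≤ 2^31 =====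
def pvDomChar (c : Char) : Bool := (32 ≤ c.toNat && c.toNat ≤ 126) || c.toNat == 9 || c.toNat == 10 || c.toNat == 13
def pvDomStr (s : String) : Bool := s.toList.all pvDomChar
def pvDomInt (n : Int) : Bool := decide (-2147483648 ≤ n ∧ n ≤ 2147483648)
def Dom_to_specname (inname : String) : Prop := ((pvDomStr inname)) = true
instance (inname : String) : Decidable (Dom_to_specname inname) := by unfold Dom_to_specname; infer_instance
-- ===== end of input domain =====

-- B replaces A's per-index scan (name[i-1]/name[i+1]) by a two-phase tokenizer:
-- group the string into maximal runs of one case-class, then emit the runs with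
-- dashes at word boundaries — alternative decomposition, same cost.

-- ===== PORT A =====
def to_specname (inname : String) : String :=
  let name := PySem.Str.replace inname "_" "-"
  let L := name.toList
  let n : Int := L.length
  let chars : List Char := (PySem.List.pyRange 0 n 1).foldl (fun acc i =>
    let c := PySem.List.pyGetD L i ' '
    let acc2 :=
      if PySem.Chars.isupper c then
        if i ≠ 0 then
          if i + 1 < n ∧ PySem.Chars.islower (PySem.List.pyGetD L (i+1) ' ') = true then
            acc ++ ['-']
          else if PySem.Chars.islower (PySem.List.pyGetD L (i-1) ' ') then
            acc ++ ['-']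
          else acc
        else
          if i ≠ 0 ∧ i + 1 = n then acc ++ ['-'] else acc
      else acc
    acc2 ++ [PySem.Chars.lowerChar c]) []
  PySem.Str.replace (String.ofList chars ++ "-spec") "--" "-"

-- ===== PORT B =====
-- case class of a char: 0 = upper, 1 = lower, 2 = other ('u'/'l'/'o' in Source B)
def pvCls (c : Char) : Nat :=
  if PySem.Chars.isupper c then 0 else if PySem.Chars.islower c then 1 else 2

-- Source B's run-building loop (runs[-1] extension / append, as a foldl)
def pvFoldRuns (cs : List Char) : List (Nat × List Char) :=
  cs.foldl (fun runs c =>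
    let k := pvCls c
    match runs.getLast? with
    | some (k0, r0) => if k0 == k then runs.dropLast ++ [(k0, r0 ++ [c])]
                       else runs ++ [(k, [c])]
    | none => [(k, [c])]) []

-- Source B's recursive emit(rs, prev_low, at_start)
def pvEmit : List (Nat × List Char) → Bool → Bool → List Char
  | [], _, _ => []
  | (k, run) :: rest, prevLow, atStart =>
    let nextLow := match rest with | (k2, _) :: _ => k2 == 1 | [] => false
    let piece : List Char :=
      if k == 0 then
        if run.length == 1 then
          (if !atStart && (prevLow || nextLow) then '-' :: run else run)
        else
          (if prevLow then ['-'] else []) ++ run.dropLast ++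
            (if nextLow then ['-'] else []) ++ [run.getLastD ' ']  -- run[-1]; runs are never empty
      else run
    piece ++ pvEmit rest (k == 1) false

def to_specname_alt (inname : String) : String :=
  let name := PySem.Str.replace inname "_" "-"
  let runs := pvFoldRuns name.toList
  let body := PySem.Chars.lower (pvEmit runs false true)   -- ''.join(...).lower(), on the list side
  PySem.Str.replace (String.ofList body ++ "-spec") "--" "-"

-- ===== PRECONDITION & SPEC =====
def Spec_to_specname (inname : String) (out : String) : Prop := out = to_specname_alt inname
instance (inname : String) (out : String) : Decidable (Spec_to_specname inname out) := by unfold Spec_to_specname; infer_instance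

-- ===== CLAIM (what is proved, stated in full; the proofs are below) =====
def Claim_equal_to_specname : Prop := ∀ (inname : String), Dom_to_specname inname → Spec_to_specname inname (to_specname inname)

-- ===== LEMMAS AND PROOFS =====

def pvOptLower (o : Option Char) : Bool :=
  match o with
  | some x => PySem.Chars.islower x
  | none => false

-- reference recursion for A's dashed-and-lowered output: prev char and the remaining suffix
def pvGo (prev : Option Char) : List Char → List Char
  | [] => []
  | c :: rest =>
    (if PySem.Chars.isupper c && prev.isSome &&
        (pvOptLower (rest.head?) || pvOptLower prev)
     then ['-', c] else [c]).map PySem.Chars.lowerChar ++ pvGo (some c) rest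

-- the same recursion without the lowering (what B's emit produces before .lower())
def pvGoRaw (prev : Option Char) : List Char → List Char
  | [] => []
  | c :: rest =>
    (if PySem.Chars.isupper c && prev.isSome &&
        (pvOptLower (rest.head?) || pvOptLower prev)
     then ['-', c] else [c]) ++ pvGoRaw (some c) rest

theorem pvGo_eq_map_raw (prev : Option Char) (cs : List Char) :
    pvGo prev cs = (pvGoRaw prev cs).map PySem.Chars.lowerChar := by
  induction cs generalizing prev with
  | nil => rfl
  | cons c rest ih => rw [pvGo, pvGoRaw, List.map_append, ih (some c)]

-- A's indexed fold over pre ++ suf, starting at index pre.length, equals the reference recursion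
theorem pvA_eq_go (suf pre : List Char) (acc : List Char) :
    (PySem.List.pyRange (pre.length : Int) ((pre ++ suf).length : Int) 1).foldl (fun acc i =>
      let L := pre ++ suf
      let n : Int := L.length
      let c := PySem.List.pyGetD L i ' '
      let acc2 :=
        if PySem.Chars.isupper c then
          if i ≠ 0 then
            if i + 1 < n ∧ PySem.Chars.islower (PySem.List.pyGetD L (i+1) ' ') = true then
              acc ++ ['-']
            else if PySem.Chars.islower (PySem.List.pyGetD L (i-1) ' ') then
              acc ++ ['-']
            else acc
          else
            if i ≠ 0 ∧ i + 1 = n then acc ++ ['-'] else acc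
        else acc
      acc2 ++ [PySem.Chars.lowerChar c]) acc
    = acc ++ pvGo (pre.getLast?) suf := by
  induction suf generalizing pre acc with
  | nil => simp [pvGo, PySem.List.pyRange_one_eq_nil]
  | cons c rest ih =>
    rw [PySem.List.pyRange_one_cons (by rw [List.length_append, List.length_cons]; push_cast; omega)]
    rw [List.foldl_cons]
    have ih' := ih (pre ++ [c])
    simp only [List.append_assoc, List.singleton_append, List.length_append, List.length_cons,
      Nat.cast_add, Nat.cast_one, List.length_nil, zero_add,
      List.getLast?_append, List.getLast?_singleton] at ih' ⊢
    rw [ih']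
    rw [pvGo]
    have hdash : PySem.Chars.lowerChar '-' = '-' := by decide
    have h1 : PySem.List.pyGetD (pre ++ c :: rest) ((pre.length : Nat) : Int) ' ' = c := by
      simp
    rw [h1]
    simp only [Option.some_or]
    rcases List.eq_nil_or_concat' pre with rfl | ⟨pre0, p, rfl⟩
    · simp [pvOptLower]
    · have hne : (((pre0 ++ [p]).length : Nat) : Int) ≠ 0 := by simp; omega
      have h2 : PySem.List.pyGetD ((pre0 ++ [p]) ++ c :: rest)
          ((((pre0 ++ [p]).length : Nat) : Int) - 1) ' ' = p := by
        rw [show ((((pre0 ++ [p]).length : Nat) : Int) - 1) = ((pre0.length : Nat) : Int) by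
          simp]
        simp [List.append_assoc]
      have hne0 : ¬((pre0.length : Nat) : Int) + 1 = 0 := by omega
      cases rest with
      | nil =>
        by_cases hu : PySem.Chars.isupper c = true <;>
          by_cases hp : PySem.Chars.islower p = true <;>
            simp [h2, hu, hp, hne0, hdash, pvOptLower]
      | cons r rest2 =>
        have h3 : PySem.List.pyGetD (pre0 ++ p :: c :: r :: rest2)
            (((pre0.length : Nat) : Int) + 1 + 1) ' ' = r := by
          rw [show (((pre0.length : Nat) : Int) + 1 + 1) = (((pre0.length + 2 : Nat) : Int)) by
            push_cast; ring, PySem.List.pyGetD_natCast]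
          simp [List.getD_eq_getElem?_getD]
        by_cases hu : PySem.Chars.isupper c = true <;>
          by_cases hp : PySem.Chars.islower p = true <;>
            by_cases hr : PySem.Chars.islower r = true <;>
              simp [h2, h3, hu, hp, hr, hne0, hdash, pvOptLower]

-- ASCII case classes are exclusive
theorem pv_upper_not_lower (c : Char) (h : PySem.Chars.isupper c = true) :
    PySem.Chars.islower c = false := by
  simp only [PySem.Chars.isupper, Bool.and_eq_true, decide_eq_true_eq,
    Char.le_def] at h
  by_contra hl
  simp only [Bool.not_eq_false, PySem.Chars.islower, Bool.and_eq_true, decide_eq_true_eq] at hl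
  exact absurd (le_trans hl.1 (Char.le_def.mpr h.2)) (by decide)

theorem pvCls_zero (c : Char) : (pvCls c == 0) = PySem.Chars.isupper c := by
  unfold pvCls
  by_cases h : PySem.Chars.isupper c = true
  · simp [h]
  · simp only [Bool.not_eq_true] at h
    by_cases h2 : PySem.Chars.islower c = true <;> simp [h, h2]

theorem pvCls_one (c : Char) : (pvCls c == 1) = PySem.Chars.islower c := by
  unfold pvCls
  by_cases h : PySem.Chars.isupper c = true
  · simp [h, pv_upper_not_lower c h]
  · simp only [Bool.not_eq_true] at h
    by_cases h2 : PySem.Chars.islower c = true <;> simp [h, h2]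

-- validity of a run list: every run nonempty and of uniform class
def pvValidRuns : List (Nat × List Char) → Prop
  | [] => True
  | (k, r) :: rest => r ≠ [] ∧ (∀ c ∈ r, pvCls c = k) ∧ pvValidRuns rest

theorem pvValidRuns_append (xs : List (Nat × List Char)) (p : Nat × List Char) :
    pvValidRuns (xs ++ [p]) ↔ pvValidRuns xs ∧ p.2 ≠ [] ∧ (∀ c ∈ p.2, pvCls c = p.1) := by
  induction xs with
  | nil => cases p; simp [pvValidRuns]
  | cons q qs ih => cases q; simp [pvValidRuns, ih]; tauto

-- the fold step preserves validity and flattens correctly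
theorem pvFoldRuns_spec (cs : List Char) :
    pvValidRuns (pvFoldRuns cs) ∧ (pvFoldRuns cs).flatMap (fun p => p.2) = cs := by
  induction cs using List.reverseRecOn with
  | nil => exact ⟨trivial, rfl⟩
  | append_singleton cs c ih =>
    obtain ⟨hv, hf⟩ := ih
    unfold pvFoldRuns at *
    rw [List.foldl_append, List.foldl_cons, List.foldl_nil]
    set rs := cs.foldl _ [] with hrs
    rcases List.eq_nil_or_concat' rs with h0 | ⟨init, ⟨k0, r0⟩, h0⟩
    · rw [h0] at hv hf ⊢
      simp only [List.getLast?_nil]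
      constructor
      · simp [pvValidRuns]
      · simp [← hf]
    · rw [h0] at hv hf ⊢
      obtain ⟨hvi, hne, huni⟩ := (pvValidRuns_append init (k0, r0)).mp hv
      simp only [List.getLast?_concat, List.dropLast_concat]
      by_cases hk : (k0 == pvCls c) = true
      · rw [if_pos hk]
        constructor
        · rw [pvValidRuns_append]
          refine ⟨hvi, by simp, ?_⟩
          intro x hx
          rcases List.mem_append.mp hx with hx | hx
          · exact huni x hx
          · simp only [List.mem_singleton] at hx
            subst hx
            exact (beq_iff_eq.mp hk).symm
        · rw [← hf]
          simp [List.flatMap_append]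
      · rw [if_neg hk]
        constructor
        · rw [pvValidRuns_append]
          exact ⟨hv, by simp, by intro x hx; simp only [List.mem_singleton] at hx; subst hx; rfl⟩
        · rw [← hf]
          simp [List.flatMap_append]

-- within-run lemmas for the reference recursion
theorem pvOptLower_some (x : Char) : pvOptLower (some x) = PySem.Chars.islower x := rfl

theorem pvOptLower_none : pvOptLower (none : Option Char) = false := rfl

theorem pvGoRaw_run_no_upper (r : List Char) (hne : r ≠ [])
    (hr : ∀ c ∈ r, PySem.Chars.isupper c = false) (prev : Option Char) (s : List Char) :
    pvGoRaw prev (r ++ s) = r ++ pvGoRaw (some (r.getLast hne)) s := by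
  induction r generalizing prev with
  | nil => exact absurd rfl hne
  | cons c r' ih =>
    have hc : PySem.Chars.isupper c = false := hr c List.mem_cons_self
    rw [List.cons_append, pvGoRaw, if_neg (by simp [hc])]
    cases r' with
    | nil => simp
    | cons d r'' =>
      rw [ih (by simp) (fun x hx => hr x (List.mem_cons_of_mem c hx)) (some c)]
      simp [List.getLast_cons]

theorem pvGoRaw_run_upper_inner (r : List Char) (hne : r ≠ [])
    (hr : ∀ c ∈ r, PySem.Chars.isupper c = true) (p : Char)
    (hp : PySem.Chars.isupper p = true) (s : List Char) :
    pvGoRaw (some p) (r ++ s) =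
      r.dropLast ++ (if pvOptLower s.head? then ['-'] else []) ++ [r.getLast hne] ++
        pvGoRaw (some (r.getLast hne)) s := by
  induction r generalizing p with
  | nil => exact absurd rfl hne
  | cons c r' ih =>
    have hc : PySem.Chars.isupper c = true := hr c List.mem_cons_self
    cases r' with
    | nil =>
      rw [List.cons_append, pvGoRaw]
      by_cases hs : pvOptLower s.head? = true
      · rw [if_pos (by simp [hc, hs])]
        simp [hs]
      · rw [if_neg (by simp [hc, hs, pvOptLower_some, pv_upper_not_lower p hp])]
        simp [hs]
    | cons d r'' =>
      have hd : PySem.Chars.isupper d = true := hr d (by simp)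
      rw [List.cons_append, pvGoRaw,
        if_neg (by simp [List.head?_cons, pvOptLower_some, pv_upper_not_lower d hd,
          pv_upper_not_lower p hp])]
      rw [ih (by simp) (fun x hx => hr x (List.mem_cons_of_mem c hx)) c hc]
      simp [List.getLast_cons, List.dropLast_cons_of_ne_nil]

theorem pvGoRaw_run_upper (r : List Char) (hne : r ≠ [])
    (hr : ∀ c ∈ r, PySem.Chars.isupper c = true) (prev : Option Char) (s : List Char) :
    pvGoRaw prev (r ++ s) =
      (if r.length == 1 then
        (if !prev.isNone && (pvOptLower prev || pvOptLower s.head?) then '-' :: r else r)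
       else
        (if pvOptLower prev then ['-'] else []) ++ r.dropLast ++
          (if pvOptLower s.head? then ['-'] else []) ++ [r.getLast hne]) ++
      pvGoRaw (some (r.getLast hne)) s := by
  cases r with
  | nil => exact absurd rfl hne
  | cons c r' =>
    have hc : PySem.Chars.isupper c = true := hr c List.mem_cons_self
    cases r' with
    | nil =>
      rw [List.cons_append, pvGoRaw]
      cases prev with
      | none => simp [pvOptLower_none]
      | some p =>
        by_cases h1 : PySem.Chars.islower p = true <;>
          by_cases h2 : pvOptLower s.head? = true <;>
            simp [hc, h1, h2, pvOptLower_some]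
    | cons d r'' =>
      have hd : PySem.Chars.isupper d = true := hr d (by simp)
      rw [List.cons_append, pvGoRaw]
      rw [pvGoRaw_run_upper_inner (d :: r'') (by simp)
          (fun x hx => hr x (List.mem_cons_of_mem c hx)) c hc]
      cases prev with
      | none =>
        simp [pvOptLower_none, List.getLast_cons, List.dropLast_cons_of_ne_nil]
      | some p =>
        by_cases h1 : PySem.Chars.islower p = true <;>
          simp [hc, h1, pvOptLower_some, pv_upper_not_lower d hd,
            List.getLast_cons, List.dropLast_cons_of_ne_nil]

-- B's emit over a valid run list is the reference recursion on the flattened chars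
theorem pvEmit_eq_goRaw (rs : List (Nat × List Char)) (prev : Option Char)
    (h : pvValidRuns rs) :
    pvEmit rs (pvOptLower prev) prev.isNone = pvGoRaw prev (rs.flatMap (fun p => p.2)) := by
  induction rs generalizing prev with
  | nil => rfl
  | cons q rest ih =>
    obtain ⟨k, r⟩ := q
    obtain ⟨hne, huni, hrest⟩ := h
    have hflat : ((k, r) :: rest).flatMap (fun p => p.2) = r ++ rest.flatMap (fun p => p.2) := by
      simp
    have hnext : (match rest with | (k2, _) :: _ => k2 == 1 | [] => false) =
        pvOptLower (rest.flatMap (fun p => p.2)).head? := by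
      cases rest with
      | nil => rfl
      | cons q2 rest2 =>
        obtain ⟨k2, r2⟩ := q2
        obtain ⟨hne2, huni2, _⟩ := hrest
        cases r2 with
        | nil => exact absurd rfl hne2
        | cons c2 r2' =>
          simp only [List.flatMap_cons, List.cons_append, List.head?_cons, pvOptLower_some]
          rw [← pvCls_one c2, huni2 c2 List.mem_cons_self]
    have hlastmem : r.getLast hne ∈ r := List.getLast_mem hne
    have hlastcls : pvCls (r.getLast hne) = k := huni _ hlastmem
    have hprevlow : (k == 1) = pvOptLower (some (r.getLast hne)) := by
      rw [pvOptLower_some, ← pvCls_one (r.getLast hne), hlastcls]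
    have hgetD : r.getLastD ' ' = r.getLast hne := by
      rw [List.getLastD_eq_getLast?, List.getLast?_eq_some_getLast hne, Option.getD_some]
    rw [hflat]
    show (let nextLow := match rest with | (k2, _) :: _ => k2 == 1 | [] => false
          let piece : List Char :=
            if k == 0 then
              if r.length == 1 then
                (if !prev.isNone && (pvOptLower prev || nextLow) then '-' :: r else r)
              else
                (if pvOptLower prev then ['-'] else []) ++ r.dropLast ++
                  (if nextLow then ['-'] else []) ++ [r.getLastD ' ']
            else r
          piece ++ pvEmit rest (k == 1) false) = _
    simp only [hnext, hprevlow, hgetD]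
    rw [show (false : Bool) = Option.isNone (some (r.getLast hne)) from rfl,
      ih (some (r.getLast hne)) hrest]
    by_cases hk : k = 0
    · subst hk
      have hupper : ∀ c ∈ r, PySem.Chars.isupper c = true := by
        intro c hcm
        rw [← pvCls_zero c, huni c hcm]
        rfl
      rw [pvGoRaw_run_upper r hne hupper prev]
      simp
    · have hnoupper : ∀ c ∈ r, PySem.Chars.isupper c = false := by
        intro c hcm
        have h0 := pvCls_zero c
        rw [huni c hcm, beq_eq_false_iff_ne.mpr hk] at h0
        exact h0.symm
      rw [pvGoRaw_run_no_upper r hne hnoupper prev]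
      have hk0 : (k == 0) = false := by simp [hk]
      simp [hk0]

-- ===== VERDICT (by name: the statement is the Claim_ definition above) =====
set_option maxHeartbeats 1000000 in
theorem to_specname_spec : Claim_equal_to_specname := by
  intro inname _
  unfold Spec_to_specname to_specname to_specname_alt
  have hA := pvA_eq_go ((PySem.Str.replace inname "_" "-").toList) [] []
  simp only [List.nil_append, List.length_nil, Nat.cast_zero, List.getLast?_nil] at hA
  obtain ⟨hv, hf⟩ := pvFoldRuns_spec ((PySem.Str.replace inname "_" "-").toList)
  have hB := pvEmit_eq_goRaw (pvFoldRuns ((PySem.Str.replace inname "_" "-").toList))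
    (none : Option Char) hv
  rw [hf] at hB
  have hBody : PySem.Chars.lower
      (pvEmit (pvFoldRuns ((PySem.Str.replace inname "_" "-").toList)) false true) =
      pvGo (none : Option Char) ((PySem.Str.replace inname "_" "-").toList) := by
    show (pvEmit (pvFoldRuns ((PySem.Str.replace inname "_" "-").toList))
        (pvOptLower (none : Option Char))
        (Option.isNone (none : Option Char))).map PySem.Chars.lowerChar = _
    rw [hB, pvGo_eq_map_raw]
  exact congrArg (fun l => PySem.Str.replace (String.ofList l ++ "-spec") "--" "-")
    (hA.trans hBody.symm)
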